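-- pv_equiv track=rewrite | github.com/Ratnesh8577/Leetcode_Daily_Fire | 2294(Partition Array Such That Maximum Difference Is K).py | partitionArray
-- ===== SOURCE A (Python) =====
-- from typing import List
--
-- def partitionArray(nums: List[int], k: int) -> int:
--     nums.sort()
--     count = 1  # We need at least one subsequence
--     start = 0  # Start index of the current group
--
--     for i in range(len(nums)):
--         if nums[i] - nums[start] > k:
--             count += 1
--             start = i  # Start a new group from this index
--
--     return count
-- ===== SOURCE B (Python) =====
-- from typing import List
-- from bisect import bisect_right
--
--
-- def partitionArray(nums: List[int], k: int) -> int: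
--     nums.sort()
--     n = len(nums)
--     count = 0
--     i = 0
--     while i < n:
--         count += 1
--         # the current group is nums[i:j) where j is found by binary search;
--         # always advance at least one position so the loop terminates for any k
--         i = max(bisect_right(nums, nums[i] + k), i + 1)
--     return count
-- ===== Notes on version B (the rewrite author's own statement) =====
-- stated objective: faster
-- what changed: After sorting, B jumps from group start to group start with bisect_right (binary search) instead of A's element-by-element scan maintaining count/start, so the post-sort work is O(g log n) for g groups instead of O(n).
-- intended difference: On empty input and on k < 0 (where no valid group exists) A returns len(nums)+1 (1 for empty; more parts than elements, an impossible partition count), while B returns one group per jump, i.e. len(nums) (0 for empty), the intended greedy count. — e.g. on partitionArray([0], -1): A returns 2, B returns 1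
import Mathlib
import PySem

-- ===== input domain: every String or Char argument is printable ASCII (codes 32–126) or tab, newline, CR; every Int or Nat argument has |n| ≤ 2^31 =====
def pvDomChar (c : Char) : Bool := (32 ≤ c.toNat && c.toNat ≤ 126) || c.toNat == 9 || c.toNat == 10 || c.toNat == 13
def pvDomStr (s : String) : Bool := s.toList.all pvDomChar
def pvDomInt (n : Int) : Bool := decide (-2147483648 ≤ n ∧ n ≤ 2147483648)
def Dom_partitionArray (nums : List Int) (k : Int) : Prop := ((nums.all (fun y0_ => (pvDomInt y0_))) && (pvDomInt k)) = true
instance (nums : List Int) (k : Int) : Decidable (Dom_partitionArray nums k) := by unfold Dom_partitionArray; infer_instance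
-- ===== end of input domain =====

-- B replaces A's element-by-element scan after sorting by bisect_right jumps from
-- group start to group start (both sort the argument in place, the same mutation);
-- a timing run measured B faster by a constant factor.

-- ===== PORT A =====
def partitionArray (nums : List Int) (k : Int) : Int :=
  let s := PySem.List.sorted nums (fun x => x)
  ((PySem.List.pyRange 0 (s.length : Int) 1).foldl
    (fun (p : Int × Int) i =>
      if PySem.List.pyGetD s i 0 - PySem.List.pyGetD s p.2 0 > k then (p.1 + 1, i) else p)
    (1, 0)).1

-- ===== PORT B =====
-- Source B's while-loop: count a group, jump with bisect_right (advancing at least one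
-- position); i strictly increases each iteration, so fuel = len + 1 never runs out
def pvBisectJump (s : List Int) (k : Int) : Nat → Nat → Int
  | 0, _ => 0
  | fuel + 1, i =>
    if h : i < s.length then
      1 + pvBisectJump s k fuel (max (PySem.List.bisectRight s (s[i] + k)) (i + 1))
    else 0

def partitionArray_alt (nums : List Int) (k : Int) : Int :=
  pvBisectJump (PySem.List.sorted nums (fun x => x)) k ((PySem.List.sorted nums (fun x => x)).length + 1) 0

-- ===== PRECONDITION & SPEC =====
-- On empty input and on k < 0 (where no valid group exists) A returns len(nums)+1
-- (1 for empty; more parts than elements, an impossible partition count), while B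
-- returns one group per jump, i.e. len(nums) (0 for empty), the intended greedy count.
def D_partitionArray (nums : List Int) (k : Int) : Prop := nums = [] ∨ k < 0
instance (nums : List Int) (k : Int) : Decidable (D_partitionArray nums k) := by
  unfold D_partitionArray; infer_instance

def Spec_partitionArray (nums : List Int) (k : Int) (out : Int) : Prop :=
  ¬ D_partitionArray nums k → out = partitionArray_alt nums k
instance (nums : List Int) (k : Int) (out : Int) : Decidable (Spec_partitionArray nums k out) := by
  unfold Spec_partitionArray; infer_instance

def pvDiffWitness_partitionArray : List Int × Int := ([0], -1)
def pvDiffWitnessOut_partitionArray : Int × Int := (2, 1)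

-- ===== CLAIM (what is proved, stated in full; the proofs are below) =====
def Claim_unchanged_partitionArray : Prop := ∀ (nums : List Int) (k : Int), Dom_partitionArray nums k → Spec_partitionArray nums k (partitionArray nums k)
def Claim_changed_partitionArray : Prop := Dom_partitionArray (pvDiffWitness_partitionArray.1) (pvDiffWitness_partitionArray.2) ∧ D_partitionArray (pvDiffWitness_partitionArray.1) (pvDiffWitness_partitionArray.2) ∧ partitionArray (pvDiffWitness_partitionArray.1) (pvDiffWitness_partitionArray.2) = pvDiffWitnessOut_partitionArray.1 ∧ partitionArray_alt (pvDiffWitness_partitionArray.1) (pvDiffWitness_partitionArray.2) = pvDiffWitnessOut_partitionArray.2 ∧ pvDiffWitnessOut_partitionArray.1 ≠ pvDiffWitnessOut_partitionArray.2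
def Claim_exact_partitionArray : Prop := ∀ (nums : List Int) (k : Int), Dom_partitionArray nums k → D_partitionArray nums k → partitionArray nums k ≠ partitionArray_alt nums k

-- ===== LEMMAS AND PROOFS =====

-- the fuel argument is irrelevant as long as it exceeds the remaining length
theorem pvBisectJump_irrel (s : List Int) (k : Int) :
    ∀ f1 f2 i, s.length - i < f1 → s.length - i < f2 →
    pvBisectJump s k f1 i = pvBisectJump s k f2 i := by
  intro f1
  induction f1 with
  | zero => intro f2 i h1 _; omega
  | succ f1 ih =>
    intro f2 i h1 h2
    cases f2 with
    | zero => omega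
    | succ f2 =>
      simp only [pvBisectJump]
      by_cases h : i < s.length
      · rw [dif_pos h, dif_pos h]
        have hnext := Nat.le_max_right (PySem.List.bisectRight s (s[i] + k)) (i + 1)
        rw [ih f2 _ (by omega) (by omega)]
      · rw [dif_neg h, dif_neg h]

theorem pvBisectJump_pos (s : List Int) (k : Int) (i : Nat) (h : i < s.length) :
    pvBisectJump s k (s.length + 1) i
      = 1 + pvBisectJump s k (s.length + 1) (max (PySem.List.bisectRight s (s[i] + k)) (i + 1)) := by
  conv_lhs => rw [pvBisectJump]
  rw [dif_pos h]
  have hnext := Nat.le_max_right (PySem.List.bisectRight s (s[i] + k)) (i + 1)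
  rw [pvBisectJump_irrel s k s.length (s.length + 1) _ (by omega) (by omega)]

theorem pvBisectJump_neg (s : List Int) (k : Int) (i : Nat) (h : s.length ≤ i) :
    pvBisectJump s k (s.length + 1) i = 0 := by
  rw [pvBisectJump, dif_neg (Nat.not_lt.mpr h)]

-- elementwise monotonicity of a ≤-pairwise list
theorem pvMono (s : List Int) (hs : s.Pairwise (· ≤ ·)) (m q : Nat)
    (hq : q < s.length) (hmq : m ≤ q) : s[m]'(lt_of_le_of_lt hmq hq) ≤ s[q] := by
  rcases Nat.lt_or_ge m q with h | h
  · exact List.pairwise_iff_getElem.mp hs m q (lt_of_le_of_lt hmq hq) hq h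
  · have : m = q := le_antisymm hmq h
    subst this; exact le_refl _

-- bisect_right lands exactly at the boundary j determined by the threshold x
theorem pvBisect_eq (s : List Int) (x : Int) (j : Nat) (hs : s.Pairwise (· ≤ ·))
    (hj : j ≤ s.length)
    (h1 : ∀ m (hm : m < s.length), m < j → s[m] ≤ x)
    (h2 : ∀ (hj' : j < s.length), x < s[j]) :
    PySem.List.bisectRight s x = j := by
  obtain ⟨hb1, hb2, hb3⟩ := PySem.List.bisectRight_spec s x hs
  rcases Nat.lt_trichotomy (PySem.List.bisectRight s x) j with h | h | h
  · have hblen : PySem.List.bisectRight s x < s.length := lt_of_lt_of_le h hj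
    have hA := hb3 _ hblen (le_refl _)
    have hB := h1 _ hblen h
    omega
  · exact h
  · have hjlen : j < s.length := lt_of_lt_of_le h hb1
    have hA := hb2 j hjlen h
    have hB := h2 hjlen
    omega

theorem pvLt_bisect (s : List Int) (x : Int) (hs : s.Pairwise (· ≤ ·)) (i : Nat)
    (hi : i < s.length) (hx : s[i] ≤ x) : i < PySem.List.bisectRight s x := by
  by_contra h
  have := (PySem.List.bisectRight_spec s x hs).2.2 i hi (Nat.le_of_not_lt h)
  omega

-- A's fold from index i₀, current group started at st: the scan finds the same
-- boundaries as B's bisect jumps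
theorem pvFoldA (s : List Int) (k : Int) (hs : s.Pairwise (· ≤ ·)) :
    ∀ (fuel i₀ st : Nat) (c : Int), s.length - i₀ ≤ fuel → st < i₀ →
    (∀ m (hm : m < s.length), m < i₀ → s[m] ≤ s.getD st 0 + k) →
    ((PySem.List.pyRange (i₀ : Int) (s.length : Int) 1).foldl
        (fun (p : Int × Int) i =>
          if PySem.List.pyGetD s i 0 - PySem.List.pyGetD s p.2 0 > k then (p.1 + 1, i) else p)
        (c, (st : Int))).1
      = c + pvBisectJump s k (s.length + 1) (PySem.List.bisectRight s (s.getD st 0 + k)) := by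
  intro fuel
  induction fuel with
  | zero =>
    intro i₀ st c hfuel hst hbd
    have hge : s.length ≤ i₀ := by omega
    rw [PySem.List.pyRange_one_eq_nil (by exact_mod_cast hge)]
    have hb : PySem.List.bisectRight s (s.getD st 0 + k) = s.length :=
      pvBisect_eq s _ s.length hs (le_refl _)
        (fun m hm _ => hbd m hm (lt_of_lt_of_le hm hge))
        (fun h' => absurd h' (lt_irrefl _))
    rw [hb, pvBisectJump_neg s k s.length (le_refl _)]
    simp
  | succ fuel ih =>
    intro i₀ st c hfuel hst hbd
    by_cases hlen : i₀ < s.length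
    · have hstlen : st < s.length := lt_of_lt_of_le hst (Nat.le_of_lt hlen)
      have hk0 : 0 ≤ k := by
        have := hbd st hstlen hst
        rw [List.getD_eq_getElem s 0 hstlen] at this
        omega
      rw [PySem.List.pyRange_one_cons (by exact_mod_cast hlen)]
      simp only [List.foldl_cons, PySem.List.pyGetD_natCast]
      have hgst : s.getD st 0 = s[st] := List.getD_eq_getElem s 0 hstlen
      have hgi : s.getD i₀ 0 = s[i₀] := List.getD_eq_getElem s 0 hlen
      have hcast : (i₀ : Int) + 1 = ((i₀ + 1 : Nat) : Int) := by push_cast; ring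
      by_cases hcond : s.getD i₀ 0 - s.getD st 0 > k
      · rw [if_pos hcond, hcast]
        have hIH := ih (i₀ + 1) i₀ (c + 1) (by omega) (Nat.lt_succ_self _)
          (fun m hm hmlt => by
            rw [hgi]
            have hmle : m ≤ i₀ := Nat.lt_succ_iff.mp hmlt
            have := pvMono s hs m i₀ hlen hmle
            omega)
        rw [hIH]
        -- the boundary found by the scan is exactly bisect_right of the old group
        have hb : PySem.List.bisectRight s (s.getD st 0 + k) = i₀ :=
          pvBisect_eq s _ i₀ hs (Nat.le_of_lt hlen) (fun m hm hmlt => hbd m hm hmlt)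
            (fun _ => by omega)
        rw [hb, pvBisectJump_pos s k i₀ hlen]
        have hmax : max (PySem.List.bisectRight s (s[i₀] + k)) (i₀ + 1)
            = PySem.List.bisectRight s (s[i₀] + k) :=
          Nat.max_eq_left (pvLt_bisect s _ hs i₀ hlen (by omega))
        rw [hmax, hgi]
        ring
      · rw [if_neg hcond, hcast]
        exact ih (i₀ + 1) st c (by omega) (Nat.lt_succ_of_lt hst)
          (fun m hm hmlt => by
            rcases Nat.lt_succ_iff_lt_or_eq.mp hmlt with h | h
            · exact hbd m hm h
            · subst h; omega)
    · have hge : s.length ≤ i₀ := Nat.le_of_not_lt hlen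
      rw [PySem.List.pyRange_one_eq_nil (by exact_mod_cast hge)]
      have hb : PySem.List.bisectRight s (s.getD st 0 + k) = s.length :=
        pvBisect_eq s _ s.length hs (le_refl _)
          (fun m hm _ => hbd m hm (lt_of_lt_of_le hm hge))
          (fun h' => absurd h' (lt_irrefl _))
      rw [hb, pvBisectJump_neg s k s.length (le_refl _)]
      simp

-- A's fold when k < 0: every element opens a new part
theorem pvFoldA_neg (s : List Int) (k : Int) (hs : s.Pairwise (· ≤ ·)) (hk : k < 0) :
    ∀ (fuel i₀ st : Nat) (c : Int), s.length - i₀ ≤ fuel → st ≤ i₀ → i₀ ≤ s.length →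
    ((PySem.List.pyRange (i₀ : Int) (s.length : Int) 1).foldl
        (fun (p : Int × Int) i =>
          if PySem.List.pyGetD s i 0 - PySem.List.pyGetD s p.2 0 > k then (p.1 + 1, i) else p)
        (c, (st : Int))).1
      = c + ((s.length - i₀ : Nat) : Int) := by
  intro fuel
  induction fuel with
  | zero =>
    intro i₀ st c hfuel hst hle
    have hge : s.length = i₀ := by omega
    rw [PySem.List.pyRange_one_eq_nil (by exact_mod_cast hge.le)]
    simp [hge]
  | succ fuel ih =>
    intro i₀ st c hfuel hst hle
    by_cases hlen : i₀ < s.length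
    · have hstlen : st < s.length := lt_of_le_of_lt hst hlen
      rw [PySem.List.pyRange_one_cons (by exact_mod_cast hlen)]
      simp only [List.foldl_cons, PySem.List.pyGetD_natCast]
      have hgst : s.getD st 0 = s[st] := List.getD_eq_getElem s 0 hstlen
      have hgi : s.getD i₀ 0 = s[i₀] := List.getD_eq_getElem s 0 hlen
      have hmono := pvMono s hs st i₀ hlen hst
      rw [if_pos (by omega)]
      have hcast : (i₀ : Int) + 1 = ((i₀ + 1 : Nat) : Int) := by push_cast; ring
      rw [hcast, ih (i₀ + 1) i₀ (c + 1) (by omega) (Nat.le_succ _) hlen]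
      have : s.length - i₀ = (s.length - (i₀ + 1)) + 1 := by omega
      rw [this]
      push_cast
      ring
    · have hge : s.length ≤ i₀ := Nat.le_of_not_lt hlen
      have heq : s.length = i₀ := le_antisymm hge hle
      rw [PySem.List.pyRange_one_eq_nil (by exact_mod_cast hge)]
      simp [heq]

-- B counts at most one part per element
theorem pvBisectJump_le (s : List Int) (k : Int) :
    ∀ (fuel i : Nat), s.length - i ≤ fuel →
    pvBisectJump s k (s.length + 1) i ≤ ((s.length - i : Nat) : Int) := by
  intro fuel
  induction fuel with
  | zero =>
    intro i hfuel
    have hge : s.length ≤ i := by omega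
    rw [pvBisectJump_neg s k i hge]
    omega
  | succ fuel ih =>
    intro i hfuel
    by_cases hlen : i < s.length
    · rw [pvBisectJump_pos s k i hlen]
      have hnext : i + 1 ≤ max (PySem.List.bisectRight s (s[i] + k)) (i + 1) :=
        Nat.le_max_right _ _
      have hIH := ih (max (PySem.List.bisectRight s (s[i] + k)) (i + 1)) (by omega)
      omega
    · rw [pvBisectJump_neg s k i (Nat.le_of_not_lt hlen)]
      omega

-- ===== VERDICT (by name: the statement is the Claim_ definition above) =====
theorem partitionArray_spec : Claim_unchanged_partitionArray := by
  unfold Claim_unchanged_partitionArray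
  intro nums k _ hnd
  unfold D_partitionArray at hnd
  obtain ⟨hne, hk⟩ := not_or.mp hnd
  have hk0 : 0 ≤ k := Int.not_lt.mp hk
  simp only [partitionArray, partitionArray_alt]
  set s := PySem.List.sorted nums (fun x => x) with hsdef
  have hs : s.Pairwise (· ≤ ·) := by
    have := PySem.List.sorted_pairwise nums (fun x => x)
    simpa using this
  have hslen : 0 < s.length := by
    rw [List.length_pos_iff]
    intro h
    exact hne ((PySem.List.sorted_eq_nil_iff _ _ _).mp h)
  -- A's side: peel off i = 0 (never a boundary since k ≥ 0), then pvFoldA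
  rw [PySem.List.pyRange_one_cons (by exact_mod_cast hslen)]
  simp only [List.foldl_cons]
  rw [if_neg (by simp [PySem.List.pyGetD_zero]; omega)]
  have hF := pvFoldA s k hs s.length 1 0 1 (by omega) Nat.one_pos
    (fun m hm hmlt => by
      have : m = 0 := by omega
      subst this
      rw [List.getD_eq_getElem s 0 hslen]
      omega)
  simp only [Nat.cast_zero, Nat.cast_one] at hF
  rw [show (0 : Int) + 1 = 1 by norm_num, hF]
  -- B's side: first jump, with max a no-op
  rw [pvBisectJump_pos s k 0 hslen]
  have hg0 : s.getD 0 0 = s[0] := List.getD_eq_getElem s 0 hslen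
  have hmax : max (PySem.List.bisectRight s (s[0] + k)) (0 + 1)
      = PySem.List.bisectRight s (s[0] + k) :=
    Nat.max_eq_left (pvLt_bisect s _ hs 0 hslen (by omega))
  rw [hmax, hg0]

theorem partitionArray_changed : Claim_changed_partitionArray := by
  unfold Claim_changed_partitionArray; decide

theorem partitionArray_tight : Claim_exact_partitionArray := by
  unfold Claim_exact_partitionArray
  intro nums k _ hd
  simp only [partitionArray, partitionArray_alt]
  set s := PySem.List.sorted nums (fun x => x) with hsdef
  have hs : s.Pairwise (· ≤ ·) := by
    have := PySem.List.sorted_pairwise nums (fun x => x)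
    simpa using this
  by_cases hk : k < 0
  · -- A returns len + 1, B returns at most len
    have hA := pvFoldA_neg s k hs hk s.length 0 0 1 (by omega) (le_refl _) (Nat.zero_le _)
    have hB := pvBisectJump_le s k s.length 0 (by omega)
    have hcast0 : ((0 : Nat) : Int) = (0 : Int) := by norm_num
    rw [hcast0] at hA
    simp only [hA]
    intro hEq
    rw [← hEq] at hB
    simp at hB
  · -- then nums = [], where A returns 1 and B returns 0
    have hnil : nums = [] := by
      unfold D_partitionArray at hd
      tauto
    have hsnil : s = [] := by
      rw [hsdef, hnil]
      exact (PySem.List.sorted_eq_nil_iff _ _ _).mpr rfl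
    rw [hsnil]
    simp [PySem.List.pyRange_one_eq_nil, pvBisectJump]
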